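-- pv_equiv track=rewrite | github.com/khadraAJ/Terminator | fonctions_terminator.py | addModifiers
-- ===== SOURCE A (Python) =====
-- def addModifiers(listValue, posValue, listModifiers, posModifiers):
--     newString = ''
--     if listValue!=[]: #if there are qualitative values in the text
--         if listModifiers!=[]: #if there are 'modifiers' in the sentence
--             for i in posValue: #for each position in the list of positions
--                 ind_val = posValue.index(i) #we keep the indexof this value in the list
--                 for j in posModifiers: #for each modifier found
--                     ind_mod = posModifiers.index(j) #we store its index in the list
--                     if j[0] < i[0] and newString=='': #if the modifier is situated before the value
--                         newString = listModifiers[ind_mod] + ' ' + listValue[ind_val] #then we concatenate them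
--                         listValue[ind_val]=newString #we replace the new value in the list of values
--     return(listValue)
-- ===== SOURCE B (Python) =====
-- def addModifiers(listValue, posValue, listModifiers, posModifiers):
--     # mutates listValue in place (like the original) and returns it
--     if not listValue or not listModifiers or not posModifiers or not posValue:
--         return listValue
--     mmin = min(m[0] for m in posModifiers)
--     target = None
--     for i in posValue:
--         if i[0] > mmin:  # some modifier precedes this value
--             target = i
--             break
--     if target is None:
--         return listValue
--     for j in posModifiers:
--         if j[0] < target[0]:
--             mod = j
--             break
--     iv = posValue.index(target)
--     im = posModifiers.index(mod)
--     listValue[iv] = listModifiers[im] + ' ' + listValue[iv]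
--     return listValue
-- ===== Notes on version B (the rewrite author's own statement) =====
-- stated objective: faster
-- what changed: A's two nested loops (each iteration re-running list.index over the whole list) are replaced by one min() pass over the modifier positions plus two early-exit scans and two index lookups that locate the single (value, modifier) pair A ever concatenates.
import Mathlib
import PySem

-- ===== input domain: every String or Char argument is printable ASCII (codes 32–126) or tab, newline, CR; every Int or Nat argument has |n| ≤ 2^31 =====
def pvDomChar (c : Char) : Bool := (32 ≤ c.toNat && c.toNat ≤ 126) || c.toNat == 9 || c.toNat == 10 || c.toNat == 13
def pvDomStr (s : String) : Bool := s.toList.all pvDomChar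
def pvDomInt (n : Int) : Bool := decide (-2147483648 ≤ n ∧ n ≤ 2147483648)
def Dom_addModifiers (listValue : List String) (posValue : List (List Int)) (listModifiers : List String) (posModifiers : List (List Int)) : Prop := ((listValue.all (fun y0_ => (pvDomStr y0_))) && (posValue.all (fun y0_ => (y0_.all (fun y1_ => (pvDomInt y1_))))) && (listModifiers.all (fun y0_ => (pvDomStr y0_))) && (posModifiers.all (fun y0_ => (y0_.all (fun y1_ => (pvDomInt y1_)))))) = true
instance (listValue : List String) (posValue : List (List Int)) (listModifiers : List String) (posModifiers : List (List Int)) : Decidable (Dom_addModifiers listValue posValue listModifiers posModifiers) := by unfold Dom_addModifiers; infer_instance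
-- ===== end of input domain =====

-- B replaces A's quadruply-nested scan (two nested loops, each iteration re-running list.index)
-- by one min() pass plus two early-exit scans and two index lookups; both mutate listValue in
-- place (the equivalence proved is about the returned value, which is that same list).

-- ===== PORT A =====
-- inner loop body of A (`for j in posModifiers: ...`), state = (newString, listValue)
def pvInnerA (posValue posModifiers : List (List Int)) (listModifiers : List String)
    (i : List Int) (st : String × List String) (j : List Int) : String × List String :=
  let ind_val : Nat := (PySem.List.index? posValue i).getD 0
  let ind_mod : Nat := (PySem.List.index? posModifiers j).getD 0
  if (PySem.List.pyGet? j 0).getD 0 < (PySem.List.pyGet? i 0).getD 0 ∧ st.1 = "" then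
    let ns := ((PySem.List.pyGet? listModifiers (ind_mod : Int)).getD "") ++ " " ++
              ((PySem.List.pyGet? st.2 (ind_val : Int)).getD "")
    (ns, st.2.set ind_val ns)
  else st

def addModifiers (listValue : List String) (posValue : List (List Int)) (listModifiers : List String) (posModifiers : List (List Int)) : List String :=
  if listValue ≠ [] then
    if listModifiers ≠ [] then
      (posValue.foldl (fun st i => posModifiers.foldl (pvInnerA posValue posModifiers listModifiers i) st)
        ("", listValue)).2
    else listValue
  else listValue

-- ===== PORT B =====
def addModifiers_alt (listValue : List String) (posValue : List (List Int)) (listModifiers : List String) (posModifiers : List (List Int)) : List String :=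
  if listValue = [] ∨ listModifiers = [] ∨ posModifiers = [] ∨ posValue = [] then listValue
  else
    let mmin : Int := (PySem.List.min? (posModifiers.map (fun m => (PySem.List.pyGet? m 0).getD 0)) (fun x => x)).getD 0
    match posValue.find? (fun i => decide (mmin < (PySem.List.pyGet? i 0).getD 0)) with
    | none => listValue
    | some target =>
      match posModifiers.find? (fun j => decide ((PySem.List.pyGet? j 0).getD 0 < (PySem.List.pyGet? target 0).getD 0)) with
      | none => listValue
      | some mod =>
        let iv : Nat := (PySem.List.index? posValue target).getD 0
        let im : Nat := (PySem.List.index? posModifiers mod).getD 0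
        listValue.set iv (((PySem.List.pyGet? listModifiers (im : Int)).getD "") ++ " " ++
                          ((PySem.List.pyGet? listValue (iv : Int)).getD ""))

-- ===== PRECONDITION & SPEC =====
-- Pre_ holds exactly where the Python A returns (no IndexError): either a degenerate list makes
-- the loops a no-op, or every position list is nonempty and, at the one (value, modifier) pair
-- the loop concatenates, the looked-up indices are within listValue / listModifiers.
def Pre_addModifiers (listValue : List String) (posValue : List (List Int)) (listModifiers : List String) (posModifiers : List (List Int)) : Prop :=
  listValue = [] ∨ listModifiers = [] ∨ posValue = [] ∨ posModifiers = [] ∨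
  ((∀ i ∈ posValue, i ≠ []) ∧ (∀ j ∈ posModifiers, j ≠ []) ∧
    (Option.all (fun i =>
        decide ((PySem.List.index? posValue i).getD 0 < listValue.length) &&
        Option.all (fun j => decide ((PySem.List.index? posModifiers j).getD 0 < listModifiers.length))
          (posModifiers.find? (fun j => decide ((PySem.List.pyGet? j 0).getD 0 < (PySem.List.pyGet? i 0).getD 0))))
      (posValue.find? (fun i => posModifiers.any (fun j => decide ((PySem.List.pyGet? j 0).getD 0 < (PySem.List.pyGet? i 0).getD 0))))) = true)
instance (listValue : List String) (posValue : List (List Int)) (listModifiers : List String) (posModifiers : List (List Int)) : Decidable (Pre_addModifiers listValue posValue listModifiers posModifiers) := by unfold Pre_addModifiers; infer_instance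

def pvWitness_addModifiers : List String × List (List Int) × List String × List (List Int) :=
  (["dog", "cat"], [[5], [9]], ["big"], [[1]])

def Spec_addModifiers (listValue : List String) (posValue : List (List Int)) (listModifiers : List String) (posModifiers : List (List Int)) (out : List String) : Prop := out = addModifiers_alt listValue posValue listModifiers posModifiers
instance (listValue : List String) (posValue : List (List Int)) (listModifiers : List String) (posModifiers : List (List Int)) (out : List String) : Decidable (Spec_addModifiers listValue posValue listModifiers posModifiers out) := by unfold Spec_addModifiers; infer_instance

-- ===== CLAIM (what is proved, stated in full; the proofs are below) =====
def Claim_equal_addModifiers : Prop := ∀ (listValue : List String) (posValue : List (List Int)) (listModifiers : List String) (posModifiers : List (List Int)), Dom_addModifiers listValue posValue listModifiers posModifiers → Pre_addModifiers listValue posValue listModifiers posModifiers → Spec_addModifiers listValue posValue listModifiers posModifiers (addModifiers listValue posValue listModifiers posModifiers)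

-- ===== LEMMAS AND PROOFS =====

-- the string A concatenates at the triggering pair (i, j), reading list L
def pvNS (posValue posModifiers : List (List Int)) (listModifiers : List String)
    (i : List Int) (L : List String) (j : List Int) : String :=
  ((PySem.List.pyGet? listModifiers (((PySem.List.index? posModifiers j).getD 0 : Nat) : Int)).getD "") ++ " " ++
  ((PySem.List.pyGet? L (((PySem.List.index? posValue i).getD 0 : Nat) : Int)).getD "")

lemma pvNS_ne_empty (a b : String) : a ++ " " ++ b ≠ "" := by
  intro h
  have := congrArg String.length h
  simp [String.length_append] at this

lemma inner_ne (pv pm : List (List Int)) (lm : List String) (i : List Int)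
    (l : List (List Int)) (s : String) (L : List String) (hs : s ≠ "") :
    l.foldl (pvInnerA pv pm lm i) (s, L) = (s, L) := by
  induction l with
  | nil => rfl
  | cons j t ih => simpa [pvInnerA, hs] using ih

lemma inner_eq (pv pm : List (List Int)) (lm : List String) (i : List Int)
    (l : List (List Int)) (L : List String) :
    l.foldl (pvInnerA pv pm lm i) ("", L) =
      match l.find? (fun j => decide ((PySem.List.pyGet? j 0).getD 0 < (PySem.List.pyGet? i 0).getD 0)) with
      | none => ("", L)
      | some j => (pvNS pv pm lm i L j, L.set ((PySem.List.index? pv i).getD 0) (pvNS pv pm lm i L j)) := by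
  induction l with
  | nil => rfl
  | cons j t ih =>
    by_cases hj : (PySem.List.pyGet? j 0).getD 0 < (PySem.List.pyGet? i 0).getD 0
    · simp only [List.foldl_cons, List.find?_cons, hj, decide_true]
      have hstep : pvInnerA pv pm lm i ("", L) j =
          (pvNS pv pm lm i L j, L.set ((PySem.List.index? pv i).getD 0) (pvNS pv pm lm i L j)) := by
        simp [pvInnerA, hj, pvNS]
      rw [hstep]
      exact inner_ne pv pm lm i t _ _ (pvNS_ne_empty _ _)
    · simp only [List.foldl_cons, List.find?_cons, hj, decide_false]
      have hstep : pvInnerA pv pm lm i ("", L) j = ("", L) := by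
        simp [pvInnerA, hj]
      rw [hstep]; exact ih

lemma outer_ne (pv pm : List (List Int)) (lm : List String)
    (l : List (List Int)) (s : String) (L : List String) (hs : s ≠ "") :
    l.foldl (fun st i => pm.foldl (pvInnerA pv pm lm i) st) (s, L) = (s, L) := by
  induction l with
  | nil => rfl
  | cons i t ih => simpa [inner_ne pv pm lm i pm s L hs] using ih

lemma outer_eq (pv pm : List (List Int)) (lm : List String)
    (l : List (List Int)) (L : List String) :
    l.foldl (fun st i => pm.foldl (pvInnerA pv pm lm i) st) ("", L) =
      match l.find? (fun i => pm.any (fun j => decide ((PySem.List.pyGet? j 0).getD 0 < (PySem.List.pyGet? i 0).getD 0))) with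
      | none => ("", L)
      | some i =>
        match pm.find? (fun j => decide ((PySem.List.pyGet? j 0).getD 0 < (PySem.List.pyGet? i 0).getD 0)) with
        | none => ("", L)
        | some j => (pvNS pv pm lm i L j, L.set ((PySem.List.index? pv i).getD 0) (pvNS pv pm lm i L j)) := by
  induction l with
  | nil => rfl
  | cons i t ih =>
    by_cases hany : pm.any (fun j => decide ((PySem.List.pyGet? j 0).getD 0 < (PySem.List.pyGet? i 0).getD 0)) = true
    · simp only [List.foldl_cons, List.find?_cons, hany]
      rw [inner_eq]
      obtain ⟨j, hj⟩ : ∃ j, pm.find? (fun j => decide ((PySem.List.pyGet? j 0).getD 0 < (PySem.List.pyGet? i 0).getD 0)) = some j := by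
        have : (pm.find? (fun j => decide ((PySem.List.pyGet? j 0).getD 0 < (PySem.List.pyGet? i 0).getD 0))).isSome := by
          rw [List.find?_isSome]
          simpa [List.any_eq_true] using hany
        exact Option.isSome_iff_exists.mp this
      rw [hj]
      exact outer_ne pv pm lm t _ _ (pvNS_ne_empty _ _)
    · simp only [List.foldl_cons, List.find?_cons, hany]
      rw [inner_eq]
      have hnone : pm.find? (fun j => decide ((PySem.List.pyGet? j 0).getD 0 < (PySem.List.pyGet? i 0).getD 0)) = none := by
        rw [List.find?_eq_none]
        intro j hjm
        by_contra hc
        exact hany (List.any_eq_true.mpr ⟨j, hjm, by simpa using hc⟩)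
      rw [hnone]
      simpa using ih

lemma find?_congr' {α : Type} (l : List α) (p q : α → Bool) (h : ∀ x ∈ l, p x = q x) :
    l.find? p = l.find? q := by
  induction l with
  | nil => rfl
  | cons x t ih =>
    simp only [List.find?_cons, h x (by simp)]
    cases q x with
    | true => rfl
    | false => exact ih (fun y hy => h y (by simp [hy]))

-- with pm nonempty, "min(pm heads) < h i" is "some modifier head is below h i"
lemma pred_eq (pm : List (List Int)) (hpm : pm ≠ []) (i : List Int) :
    decide ((PySem.List.min? (pm.map (fun m => (PySem.List.pyGet? m 0).getD 0)) (fun x => x)).getD 0 < (PySem.List.pyGet? i 0).getD 0) =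
    pm.any (fun j => decide ((PySem.List.pyGet? j 0).getD 0 < (PySem.List.pyGet? i 0).getD 0)) := by
  obtain ⟨m, hm⟩ : ∃ m, PySem.List.min? (pm.map (fun x => (PySem.List.pyGet? x 0).getD 0)) (fun x => x) = some m := by
    have : PySem.List.min? (pm.map (fun x => (PySem.List.pyGet? x 0).getD 0)) (fun x => x) ≠ none := by
      rw [Ne, PySem.List.min?_eq_none_iff]
      simpa using hpm
    exact Option.ne_none_iff_exists'.mp this
  have hmem : m ∈ pm.map (fun x => (PySem.List.pyGet? x 0).getD 0) := PySem.List.min?_mem hm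
  have hmin : ∀ y ∈ pm.map (fun x => (PySem.List.pyGet? x 0).getD 0), m ≤ y := by
    intro y hy; exact PySem.List.min?_isMin hm y hy
  rw [hm]
  simp only [Option.getD_some]
  by_cases hc : m < (PySem.List.pyGet? i 0).getD 0
  · obtain ⟨j, hjm, hje⟩ := List.mem_map.mp hmem
    simp only [hc, decide_true, eq_comm (a := true), List.any_eq_true]
    exact ⟨j, hjm, by simp [hje, hc]⟩
  · simp only [hc, decide_false, eq_comm (a := false), List.any_eq_false]
    intro j hjm
    simp only [decide_eq_true_eq]
    intro hlt
    exact hc (lt_of_le_of_lt (hmin _ (List.mem_map.mpr ⟨j, hjm, rfl⟩)) hlt)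

lemma ports_eq (lv : List String) (pv : List (List Int)) (lm : List String) (pm : List (List Int)) :
    addModifiers lv pv lm pm = addModifiers_alt lv pv lm pm := by
  by_cases hlv : lv = []
  · simp [addModifiers, addModifiers_alt, hlv]
  by_cases hlm : lm = []
  · simp [addModifiers, addModifiers_alt, hlv, hlm]
  by_cases hpm : pm = []
  · subst hpm
    have hA : addModifiers lv pv lm [] =
        (pv.foldl (fun st i => List.foldl (pvInnerA pv [] lm i) st []) ("", lv)).2 := by
      simp [addModifiers, hlv, hlm]
    rw [hA, outer_eq]
    have hnone : pv.find? (fun i => List.any [] (fun j => decide ((PySem.List.pyGet? j 0).getD 0 < (PySem.List.pyGet? i 0).getD 0))) = none := by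
      rw [List.find?_eq_none]; intro x _; simp
    rw [hnone]
    simp [addModifiers_alt]
  by_cases hpv : pv = []
  · subst hpv
    simp [addModifiers, addModifiers_alt, hlv, hlm, hpm]
  · -- main case: all four lists nonempty
    have hA : addModifiers lv pv lm pm =
        (pv.foldl (fun st i => pm.foldl (pvInnerA pv pm lm i) st) ("", lv)).2 := by
      simp [addModifiers, hlv, hlm]
    rw [hA, outer_eq]
    have hguard : ¬ (lv = [] ∨ lm = [] ∨ pm = [] ∨ pv = []) := by
      simp [hlv, hlm, hpm, hpv]
    simp only [addModifiers_alt, hguard, if_false]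
    have hfind : pv.find? (fun i => decide ((PySem.List.min? (pm.map (fun m => (PySem.List.pyGet? m 0).getD 0)) (fun x => x)).getD 0 < (PySem.List.pyGet? i 0).getD 0)) =
        pv.find? (fun i => pm.any (fun j => decide ((PySem.List.pyGet? j 0).getD 0 < (PySem.List.pyGet? i 0).getD 0))) := by
      apply find?_congr'
      intro i _
      exact pred_eq pm hpm i
    rw [hfind]
    cases hf : pv.find? (fun i => pm.any (fun j => decide ((PySem.List.pyGet? j 0).getD 0 < (PySem.List.pyGet? i 0).getD 0))) with
    | none => rfl
    | some i =>
      cases hg : pm.find? (fun j => decide ((PySem.List.pyGet? j 0).getD 0 < (PySem.List.pyGet? i 0).getD 0)) with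
      | none => dsimp only; rw [hg]
      | some j => dsimp only; rw [hg]; simp [pvNS]

-- ===== VERDICT (by name: the statement is the Claim_ definition above) =====
theorem addModifiers_spec : Claim_equal_addModifiers := by
  intro lv pv lm pm _ _
  unfold Spec_addModifiers
  exact ports_eq lv pv lm pm
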